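-- pv_equiv track=rewrite | github.com/leculver/AdventOfCode | 2024/19_lenen_layout/solution.py | can_build_word
-- ===== SOURCE A (Python) =====
-- def can_build_word(parts, word, seen):
--     if not word:
--         return 1
--
--     if word in seen:
--         return seen[word]
--
--     count = 0
--     for part in parts:
--         if word.startswith(part):
--             count += can_build_word(parts, word[len(part):], seen)
--     seen[word] = count
--     return count
-- ===== SOURCE B (Python) =====
-- def can_build_word(parts, word, seen):
--     n = len(word)
--     dp = [1]  # dp[L] = number of ways to build the suffix of word of length L
--     for L in range(1, n + 1):
--         suf = word[n - L:]
--         if suf in seen: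
--             v = seen[suf]
--         else:
--             v = sum(dp[L - len(p)] for p in parts if p and suf.startswith(p))
--         dp.append(v)
--     return dp[n]
-- ===== Notes on version B (the rewrite author's own statement) =====
-- stated objective: alternative
-- what changed: Replaced A's memoized top-down recursion (with the seen dict as memo) by an iterative bottom-up DP table over suffix lengths, still honouring entries pre-present in seen; no recursion and no memo writes.
import Mathlib
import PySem

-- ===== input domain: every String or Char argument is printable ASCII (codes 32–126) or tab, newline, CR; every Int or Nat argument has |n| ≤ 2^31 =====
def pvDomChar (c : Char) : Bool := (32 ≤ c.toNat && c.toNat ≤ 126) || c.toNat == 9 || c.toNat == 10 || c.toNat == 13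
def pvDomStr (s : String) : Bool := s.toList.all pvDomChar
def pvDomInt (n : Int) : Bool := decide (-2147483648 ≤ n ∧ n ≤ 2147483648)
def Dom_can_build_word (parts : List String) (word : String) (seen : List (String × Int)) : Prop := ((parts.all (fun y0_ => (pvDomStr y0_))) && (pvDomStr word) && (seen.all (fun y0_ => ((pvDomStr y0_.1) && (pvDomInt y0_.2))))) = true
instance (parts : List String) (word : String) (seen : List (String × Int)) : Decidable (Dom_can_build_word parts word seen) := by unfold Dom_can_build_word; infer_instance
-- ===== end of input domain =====

-- B replaces A's memoized top-down recursion by an iterative bottom-up DP over suffix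
-- lengths (objective: alternative; same asymptotic cost, no recursion).
-- A mutates `seen` (its memo); B does not — the equivalence proved here is about the
-- RETURN value only.
-- Both ports key the memo dictionary by the word's code-point list (exact: String.toList
-- is injective, so dict lookups/inserts agree with Python's dict of strings).

-- ===== PORT A =====
-- A's recursion does not terminate when '' ∈ parts and the word is a fresh nonempty key
-- (Python RecursionError); the port carries a fuel counter only to make that computation
-- total — inside Pre_ the fuel word.length + 1 is never exhausted.
def canBuildA (parts : List String) : Nat → List Char → PySem.Dict (List Char) Int → Int × PySem.Dict (List Char) Int
  | 0, _, s => (0, s)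
  | Nat.succ fuel, w, s =>
    if w = [] then (1, s)
    else
      match s.get? w with
      | some v => (v, s)
      | none =>
        let r := parts.foldl (fun acc part =>
            if PySem.Chars.startswith w part.toList then
              let res := canBuildA parts fuel (w.drop part.toList.length) acc.2
              (acc.1 + res.1, res.2)
            else acc) ((0 : Int), s)
        (r.1, r.2.insert w r.1)

def can_build_word (parts : List String) (word : String) (seen : List (String × Int)) : Int :=
  (canBuildA parts (word.toList.length + 1) word.toList
    (PySem.Dict.ofList (seen.map (fun p => (p.1.toList, p.2))))).1

-- ===== PORT B =====
-- dpsB w = the dp list of Source B for the suffixes of w, most recent (longest) first: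
-- (dpsB w).getD j 0 = number of ways for w.drop j; built bottom-up like Source B's loop.
def dpsB (parts : List String) (seen : PySem.Dict (List Char) Int) : List Char → List Int
  | [] => [1]
  | c :: rest =>
    let tail := dpsB parts seen rest
    let v : Int :=
      match seen.get? (c :: rest) with
      | some v => v
      | none =>
        (parts.map (fun p =>
          if p ≠ "" ∧ PySem.Chars.startswith (c :: rest) p.toList then
            tail.getD (p.toList.length - 1) 0
          else 0)).sum
    v :: tail

def can_build_word_alt (parts : List String) (word : String) (seen : List (String × Int)) : Int :=
  (dpsB parts (PySem.Dict.ofList (seen.map (fun p => (p.1.toList, p.2)))) word.toList).headD 1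

-- ===== PRECONDITION & SPEC =====
-- Pre_ excludes exactly the inputs where A never returns (infinite recursion /
-- RecursionError): '' ∈ parts together with a nonempty word that is not a key of seen.
def Pre_can_build_word (parts : List String) (word : String) (seen : List (String × Int)) : Prop :=
  word = "" ∨ (∃ p ∈ seen, p.1 = word) ∨ "" ∉ parts
instance (parts : List String) (word : String) (seen : List (String × Int)) : Decidable (Pre_can_build_word parts word seen) := by unfold Pre_can_build_word; infer_instance

def pvWitness_can_build_word : List String × String × (List (String × Int)) :=
  (["a", "ab", "b"], "abab", [("b", 3)])

def Spec_can_build_word (parts : List String) (word : String) (seen : List (String × Int)) (out : Int) : Prop := out = can_build_word_alt parts word seen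
instance (parts : List String) (word : String) (seen : List (String × Int)) (out : Int) : Decidable (Spec_can_build_word parts word seen out) := by unfold Spec_can_build_word; infer_instance

-- ===== CLAIM (what is proved, stated in full; the proofs are below) =====
def Claim_equal_can_build_word : Prop := ∀ (parts : List String) (word : String) (seen : List (String × Int)), Dom_can_build_word parts word seen → Pre_can_build_word parts word seen → Spec_can_build_word parts word seen (can_build_word parts word seen)

-- ===== LEMMAS AND PROOFS =====

-- The memo invariant: every nonempty key the dict knows carries the dp value of B.
def GoodMemo (parts : List String) (seen0 s : PySem.Dict (List Char) Int) : Prop :=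
  (∀ (u : List Char) (v : Int), seen0.get? u = some v → s.get? u = some v) ∧
  (∀ (u : List Char) (v : Int), u ≠ [] → s.get? u = some v →
    v = (dpsB parts seen0 u).headD 1)

theorem dpsB_getD (parts : List String) (seen : PySem.Dict (List Char) Int)
    (w : List Char) (j : Nat) (hj : j ≤ w.length) :
    (dpsB parts seen w).getD j 0 = (dpsB parts seen (w.drop j)).headD 1 := by
  induction w generalizing j with
  | nil =>
    have : j = 0 := by simpa using hj
    subst this
    simp [dpsB]
  | cons c rest ih =>
    cases j with
    | zero => simp [dpsB]
    | succ j =>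
      simp only [dpsB, List.getD_cons_succ, List.drop_succ_cons]
      exact ih j (by simpa using hj)

-- keys present in seen0 stay present (A only adds keys), used to read the memo back.
theorem get?_foldl_insert_isSome (l : List (List Char × Int)) (k : List Char)
    (d : PySem.Dict (List Char) Int)
    (h : k ∈ l.map Prod.fst ∨ (d.get? k).isSome) :
    ((l.foldl (fun d p => d.insert p.1 p.2) d).get? k).isSome := by
  induction l generalizing d with
  | nil => simpa using h
  | cons p l ih =>
    simp only [List.foldl_cons]
    apply ih
    rcases h with h | h
    · simp only [List.map_cons, List.mem_cons] at h
      rcases h with h | h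
      · right; subst h; simp [PySem.Dict.get?_insert_self]
      · left; exact h
    · right
      rw [PySem.Dict.get?_insert]
      split
      · simp
      · exact h

theorem canBuildA_spec (parts : List String) (seen0 : PySem.Dict (List Char) Int)
    (hne : "" ∉ parts) :
    ∀ (fuel : Nat) (w : List Char) (s : PySem.Dict (List Char) Int),
      w.length < fuel → GoodMemo parts seen0 s →
      (canBuildA parts fuel w s).1 = (dpsB parts seen0 w).headD 1 ∧
        GoodMemo parts seen0 (canBuildA parts fuel w s).2 := by
  intro fuel
  induction fuel with
  | zero => intro w s h _; omega
  | succ fuel ih =>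
    intro w s hlen hG
    by_cases hw : w = []
    · subst hw
      refine ⟨by simp [canBuildA, dpsB], by simpa [canBuildA] using hG⟩
    · cases hget : s.get? w with
      | some v =>
        refine ⟨?_, ?_⟩
        · simpa [canBuildA, hw, hget] using hG.2 w v hw hget
        · simpa [canBuildA, hw, hget] using hG
      | none =>
        -- seen0 has no entry for w either
        have hseen0 : seen0.get? w = none := by
          cases h0 : seen0.get? w with
          | none => rfl
          | some v =>
            have := hG.1 w v h0
            rw [hget] at this
            cases this
        have hwlen : 1 ≤ w.length := by
          cases w with
          | nil => exact absurd rfl hw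
          | cons _ _ => simp
        -- the loop over the parts accumulates the dp contributions and keeps the invariant
        have inner : ∀ (ps : List String), (∀ p ∈ ps, p ∈ parts) →
            ∀ (a : Int) (s' : PySem.Dict (List Char) Int), GoodMemo parts seen0 s' →
            (ps.foldl (fun acc part =>
              if PySem.Chars.startswith w part.toList then
                let res := canBuildA parts fuel (w.drop part.toList.length) acc.2
                (acc.1 + res.1, res.2)
              else acc) (a, s')).1
              = a + (ps.map (fun p =>
                  if p ≠ "" ∧ PySem.Chars.startswith w p.toList then
                    (dpsB parts seen0 (w.drop p.toList.length)).headD 1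
                  else 0)).sum ∧
            GoodMemo parts seen0 ((ps.foldl (fun acc part =>
              if PySem.Chars.startswith w part.toList then
                let res := canBuildA parts fuel (w.drop part.toList.length) acc.2
                (acc.1 + res.1, res.2)
              else acc) (a, s')).2) := by
          intro ps
          induction ps with
          | nil => intro _ a s' hG'; exact ⟨by simp, by simpa using hG'⟩
          | cons p ps ihp =>
            intro hmem a s' hG'
            have hp : p ≠ "" := fun h => hne (h ▸ hmem p (List.mem_cons_self))
            by_cases hsw : PySem.Chars.startswith w p.toList
            · have hplen : 1 ≤ p.toList.length := by
                cases hpl : p.toList with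
                | nil => exact absurd (String.toList_eq_nil_iff.mp hpl) hp
                | cons _ _ => simp
              have hlt : (w.drop p.toList.length).length < fuel := by
                simp only [List.length_drop]; omega
              obtain ⟨hv, hG''⟩ := ih (w.drop p.toList.length) s' hlt hG'
              obtain ⟨h1, h2⟩ := ihp (fun q hq => hmem q (List.mem_cons_of_mem _ hq))
                (a + (canBuildA parts fuel (w.drop p.toList.length) s').1)
                (canBuildA parts fuel (w.drop p.toList.length) s').2 hG''
              refine ⟨?_, ?_⟩
              · simp only [List.foldl_cons, List.map_cons, List.sum_cons, if_pos hsw]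
                rw [h1, hv, if_pos ⟨hp, hsw⟩]
                ring
              · simpa only [List.foldl_cons, if_pos hsw] using h2
            · obtain ⟨h1, h2⟩ := ihp (fun q hq => hmem q (List.mem_cons_of_mem _ hq)) a s' hG'
              have hcond : ¬ (p ≠ "" ∧ PySem.Chars.startswith w p.toList) := fun h => hsw h.2
              refine ⟨?_, ?_⟩
              · simp only [List.foldl_cons, List.map_cons, List.sum_cons, if_neg hsw,
                  if_neg hcond]
                rw [h1]; ring
              · simpa only [List.foldl_cons, if_neg hsw] using h2
        obtain ⟨h1, h2⟩ := inner parts (fun _ h => h) 0 s hG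
        -- head of B's dp list for the nonempty word
        have hhead : (dpsB parts seen0 w).headD 1
            = (parts.map (fun p =>
                if p ≠ "" ∧ PySem.Chars.startswith w p.toList then
                  (dpsB parts seen0 (w.drop p.toList.length)).headD 1
                else 0)).sum := by
          cases w with
          | nil => exact absurd rfl hw
          | cons c rest =>
            simp only [dpsB, hseen0, List.headD_cons]
            refine congrArg List.sum (List.map_congr_left ?_)
            intro p _
            by_cases hc : p ≠ "" ∧ PySem.Chars.startswith (c :: rest) p.toList
            · rw [if_pos hc, if_pos hc]
              have hple : p.toList.length ≤ rest.length + 1 := by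
                have := ((PySem.Chars.startswith_iff (c :: rest) p.toList).mp hc.2).length_le
                simpa using this
              have hplen : 1 ≤ p.toList.length := by
                cases hpl : p.toList with
                | nil => exact absurd (String.toList_eq_nil_iff.mp hpl) hc.1
                | cons _ _ => simp
              have := dpsB_getD parts seen0 rest (p.toList.length - 1) (by omega)
              rw [this]
              obtain ⟨k, hk⟩ : ∃ k, p.toList.length = k + 1 := ⟨p.toList.length - 1, by omega⟩
              rw [hk]
              simp
            · rw [if_neg hc, if_neg hc]
        have hfix : (canBuildA parts (fuel + 1) w s) =
            ((parts.foldl (fun acc part =>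
              if PySem.Chars.startswith w part.toList then
                let res := canBuildA parts fuel (w.drop part.toList.length) acc.2
                (acc.1 + res.1, res.2)
              else acc) (0, s)).1,
             (parts.foldl (fun acc part =>
              if PySem.Chars.startswith w part.toList then
                let res := canBuildA parts fuel (w.drop part.toList.length) acc.2
                (acc.1 + res.1, res.2)
              else acc) (0, s)).2.insert w
              (parts.foldl (fun acc part =>
              if PySem.Chars.startswith w part.toList then
                let res := canBuildA parts fuel (w.drop part.toList.length) acc.2
                (acc.1 + res.1, res.2)
              else acc) (0, s)).1) := by
          simp [canBuildA, hw, hget]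
        refine ⟨?_, ?_⟩
        · rw [hfix]; simp only []
          rw [h1, hhead]; ring
        · rw [hfix]
          constructor
          · intro u v h0
            have hne' : u ≠ w := fun h => by rw [h, hseen0] at h0; cases h0
            rw [PySem.Dict.get?_insert, if_neg hne']
            exact h2.1 u v h0
          · intro u v hu h0
            rw [PySem.Dict.get?_insert] at h0
            by_cases huw : u = w
            · rw [if_pos huw] at h0
              have : v = 0 + (parts.map (fun p =>
                  if p ≠ "" ∧ PySem.Chars.startswith w p.toList then
                    (dpsB parts seen0 (w.drop p.toList.length)).headD 1
                  else 0)).sum := by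
                injection h0 with h0'
                rw [← h0', h1]
              rw [huw, hhead]
              omega
            · rw [if_neg huw] at h0
              exact h2.2 u v hu h0

-- ===== VERDICT (by name: the statement is the Claim_ definition above) =====
theorem can_build_word_spec : Claim_equal_can_build_word := by
  unfold Claim_equal_can_build_word
  intro parts word seen _ hPre
  unfold Spec_can_build_word can_build_word can_build_word_alt
  by_cases hw : word = ""
  · subst hw; simp [canBuildA, dpsB]
  · have hwl : word.toList ≠ [] := fun h => hw (String.toList_eq_nil_iff.mp h)
    rcases hPre with h | h | h
    · exact absurd h hw
    · -- word is a key of seen: both sides read the memo entry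
      obtain ⟨p, hp, hpe⟩ := h
      have hmem : word.toList ∈ (seen.map (fun q => (q.1.toList, q.2))).map Prod.fst := by
        simp only [List.map_map]
        exact List.mem_map.mpr ⟨p, hp, by simp [hpe]⟩
      have hsome : ((PySem.Dict.ofList (seen.map (fun q => (q.1.toList, q.2)))).get?
          word.toList).isSome :=
        get?_foldl_insert_isSome _ _ PySem.Dict.empty (Or.inl hmem)
      obtain ⟨v, hv⟩ := Option.isSome_iff_exists.mp hsome
      cases hwt : word.toList with
      | nil => exact absurd hwt hwl
      | cons c rest =>
        rw [hwt] at hv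
        simp [canBuildA, dpsB, hv]
    · -- '' is not a part: the memo invariant holds for seen itself and A computes B's dp
      have hgood : GoodMemo parts (PySem.Dict.ofList (seen.map (fun q => (q.1.toList, q.2))))
          (PySem.Dict.ofList (seen.map (fun q => (q.1.toList, q.2)))) := by
        refine ⟨fun u v h => h, fun u v hu hv => ?_⟩
        cases u with
        | nil => exact absurd rfl hu
        | cons c rest => simp [dpsB, hv]
      exact (canBuildA_spec parts _ h (word.toList.length + 1) word.toList _
        (by omega) hgood).1
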